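-- pv_equiv track=rewrite | github.com/Bit-Warrior-X/ddos-firewall | api_parser/app.py | parse_fifo_message
-- ===== SOURCE A (Python) =====
-- from typing import Dict, Any, List, Optional
--
-- def parse_fifo_message(raw_data: str) -> List[Dict[str, str]]:
--     """Parses raw FIFO data into command dictionaries."""
--     commands = []
--     current_command = {}
--
--     for line in raw_data.split('\n'):
--         line = line.strip()
--         if not line:
--             continue
--
--         if ':' in line:
--             key, value = line.split(':', 1)
--             key = key.strip().lower()
--             value = value.strip()
--
--             if key == 'command':
--                 if current_command:
--                     commands.append(current_command)
--                 current_command = {'command': value}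
--             else:
--                 current_command[key] = value
--
--     if current_command:
--         commands.append(current_command)
--
--     return commands
-- ===== SOURCE B (Python) =====
-- def parse_fifo_message(raw_data):
--     """Parses raw FIFO data into command dictionaries.
--
--     Two-phase rewrite: extract (key, value) pairs first, then group them by
--     scanning the pair list in reverse, so each group is a raw pair list turned
--     into a dict at the end (no mutable current dict threaded through the scan).
--     """
--     pairs = []
--     for line in raw_data.split('\n'):
--         s = line.strip()
--         if s and ':' in s:
--             k, v = s.split(':', 1)
--             pairs.append((k.strip().lower(), v.strip()))
--
--     groups = []
--     current = []
--     for k, v in reversed(pairs):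
--         if k == 'command':
--             groups.insert(0, [(k, v)] + current)
--             current = []
--         else:
--             current.insert(0, (k, v))
--     if current:
--         groups.insert(0, current)
--
--     return [dict(g) for g in groups]
-- ===== Notes on version B (the rewrite author's own statement) =====
-- stated objective: alternative
-- what changed: Replaces A's single stateful pass that threads a mutable current_command dict through the line loop with a two-phase pipeline: extract all key/value pairs first, group them into raw pair lists by a reverse scan that closes a group whenever the key names a new command, and only then turn each group into a dict.
import Mathlib
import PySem

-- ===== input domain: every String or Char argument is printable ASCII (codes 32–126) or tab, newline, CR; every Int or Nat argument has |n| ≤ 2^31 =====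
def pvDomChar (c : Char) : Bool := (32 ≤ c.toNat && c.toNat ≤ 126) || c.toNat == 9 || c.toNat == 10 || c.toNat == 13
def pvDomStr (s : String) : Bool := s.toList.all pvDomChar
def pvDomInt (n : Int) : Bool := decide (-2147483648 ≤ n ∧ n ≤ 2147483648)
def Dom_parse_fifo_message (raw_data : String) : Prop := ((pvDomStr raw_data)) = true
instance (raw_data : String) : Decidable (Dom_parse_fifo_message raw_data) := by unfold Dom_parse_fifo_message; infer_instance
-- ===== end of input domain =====

-- B re-decomposes A's single stateful pass as: extract (key,value) pairs, group them by a
-- reverse scan into raw pair lists, then turn each group into a dict (objective: alternative).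

-- ===== PORT A =====
-- A's single pass: fold over lines, threading (commands, current_command) with current a dict.
def parse_fifo_message (raw_data : String) : List (List (String × String)) :=
  let st :=
    ((PySem.Str.split? raw_data "\n").getD []).foldl
      (fun (st : List (PySem.Dict String String) × PySem.Dict String String) line =>
        let l := PySem.Str.strip line
        if l = "" then st
        else if PySem.Str.isIn ":" l then
          match PySem.Str.splitMax? l ":" 1 with
          | some (k0 :: v0 :: _) =>
            let key := PySem.Str.lower (PySem.Str.strip k0)
            let value := PySem.Str.strip v0
            if key = "command" then
              ((if st.2.items.isEmpty then st.1 else st.1 ++ [st.2]),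
               (PySem.Dict.empty : PySem.Dict String String).insert "command" value)
            else (st.1, st.2.insert key value)
          | _ => st   -- unreachable when ':' is in l; kept for the total match
        else st)
      ([], PySem.Dict.empty)
  (if st.2.items.isEmpty then st.1 else st.1 ++ [st.2]).map (·.items)

-- ===== PORT B =====
-- dict(g): fold the pairs of a group into a dict, return its items
def pvDictOf (g : List (String × String)) : List (String × String) :=
  (g.foldl (fun d p => d.insert p.1 p.2) (PySem.Dict.empty : PySem.Dict String String)).items

def parse_fifo_message_alt (raw_data : String) : List (List (String × String)) :=
  let pairs :=
    ((PySem.Str.split? raw_data "\n").getD []).foldl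
      (fun (acc : List (String × String)) line =>
        let s := PySem.Str.strip line
        if s ≠ "" ∧ PySem.Str.isIn ":" s then
          -- 'k, v = s.split(':', 1)': with ':' in s the split has exactly two parts;
          -- the other (unreachable) shapes leave acc unchanged
          match (PySem.Str.splitMax? s ":" 1).getD [] with
          | [] => acc
          | [_] => acc
          | k :: v :: _ => acc ++ [(PySem.Str.lower (PySem.Str.strip k), PySem.Str.strip v)]
        else acc)
      []
  -- 'for k, v in reversed(pairs)' with insert(0, _): a left fold over pairs.reverse
  let st :=
    pairs.reverse.foldl
      (fun (st : List (List (String × String)) × List (String × String)) p =>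
        if p.1 = "command" then ((p :: st.2) :: st.1, [])
        else (st.1, p :: st.2))
      ([], [])
  (if st.2.isEmpty then st.1 else st.2 :: st.1).map pvDictOf

-- ===== PRECONDITION & SPEC =====
def Spec_parse_fifo_message (raw_data : String) (out : List (List (String × String))) : Prop := out = parse_fifo_message_alt raw_data
instance (raw_data : String) (out : List (List (String × String))) : Decidable (Spec_parse_fifo_message raw_data out) := by unfold Spec_parse_fifo_message; infer_instance

-- ===== CLAIM (what is proved, stated in full; the proofs are below) =====
def Claim_equal_parse_fifo_message : Prop := ∀ (raw_data : String), Dom_parse_fifo_message raw_data → Spec_parse_fifo_message raw_data (parse_fifo_message raw_data)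

-- ===== LEMMAS AND PROOFS =====

-- the (key, value) pair a line contributes, if any — shared shape of both extraction codes
def pvKvs (line : String) : List (String × String) :=
  let s := PySem.Str.strip line
  if s = "" then []
  else if PySem.Str.isIn ":" s then
    match PySem.Str.splitMax? s ":" 1 with
    | some (k :: v :: _) => [(PySem.Str.lower (PySem.Str.strip k), PySem.Str.strip v)]
    | _ => []
  else []

-- A's step, at the pair level
def pvAstep (st : List (PySem.Dict String String) × PySem.Dict String String)
    (p : String × String) : List (PySem.Dict String String) × PySem.Dict String String :=
  if p.1 = "command" then
    ((if st.2.items.isEmpty then st.1 else st.1 ++ [st.2]),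
     (PySem.Dict.empty : PySem.Dict String String).insert "command" p.2)
  else (st.1, st.2.insert p.1 p.2)

def pvBstep (st : List (List (String × String)) × List (String × String))
    (p : String × String) : List (List (String × String)) × List (String × String) :=
  if p.1 = "command" then ((p :: st.2) :: st.1, []) else (st.1, p :: st.2)

theorem pvA_line_eq_pairs (lines : List String)
    (st : List (PySem.Dict String String) × PySem.Dict String String) :
    lines.foldl
      (fun (st : List (PySem.Dict String String) × PySem.Dict String String) line =>
        let l := PySem.Str.strip line
        if l = "" then st
        else if PySem.Str.isIn ":" l then
          match PySem.Str.splitMax? l ":" 1 with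
          | some (k0 :: v0 :: _) =>
            let key := PySem.Str.lower (PySem.Str.strip k0)
            let value := PySem.Str.strip v0
            if key = "command" then
              ((if st.2.items.isEmpty then st.1 else st.1 ++ [st.2]),
               (PySem.Dict.empty : PySem.Dict String String).insert "command" value)
            else (st.1, st.2.insert key value)
          | _ => st
        else st) st
    = (lines.flatMap pvKvs).foldl pvAstep st := by
  induction lines generalizing st with
  | nil => rfl
  | cons l ls ih =>
    simp only [List.foldl_cons, List.flatMap_cons, List.foldl_append]
    rw [ih]
    congr 1
    simp only [pvKvs]
    split
    · rfl
    · split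
      · rcases hs : PySem.Str.splitMax? (PySem.Str.strip l) ":" 1 with _ | ⟨_ | ⟨k, _ | ⟨v, rest⟩⟩⟩ <;>
          simp [pvAstep]
      · rfl

theorem pvB_pairs_eq_flatMap (lines : List String) (acc : List (String × String)) :
    lines.foldl
      (fun (acc : List (String × String)) line =>
        let s := PySem.Str.strip line
        if s ≠ "" ∧ PySem.Str.isIn ":" s then
          -- 'k, v = s.split(':', 1)': with ':' in s the split has exactly two parts;
          -- the other (unreachable) shapes leave acc unchanged
          match (PySem.Str.splitMax? s ":" 1).getD [] with
          | [] => acc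
          | [_] => acc
          | k :: v :: _ => acc ++ [(PySem.Str.lower (PySem.Str.strip k), PySem.Str.strip v)]
        else acc) acc
    = acc ++ lines.flatMap pvKvs := by
  induction lines generalizing acc with
  | nil => simp
  | cons l ls ih =>
    simp only [List.foldl_cons, List.flatMap_cons]
    rw [ih]
    by_cases h1 : PySem.Str.strip l = "" <;>
      by_cases h2 : PySem.Str.isIn ":" (PySem.Str.strip l) <;>
        rcases hs : PySem.Str.splitMax? (PySem.Str.strip l) ":" 1 with _ | ⟨_ | ⟨k, _ | ⟨v, rest⟩⟩⟩ <;>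
          · simp [pvKvs, h1, hs]
            try (split <;> simp)

theorem pvAstep_split (st : List (PySem.Dict String String) × PySem.Dict String String)
    (p : String × String) :
    pvAstep st p = (st.1 ++ (pvAstep ([], st.2) p).1, (pvAstep ([], st.2) p).2) := by
  simp only [pvAstep]
  by_cases h : p.1 = "command" <;> by_cases hc : st.2.items.isEmpty <;> simp [h, hc]

theorem pvAfold_prefix (ps : List (String × String))
    (st : List (PySem.Dict String String) × PySem.Dict String String) :
    ps.foldl pvAstep st
      = (st.1 ++ (ps.foldl pvAstep ([], st.2)).1, (ps.foldl pvAstep ([], st.2)).2) := by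
  induction ps generalizing st with
  | nil => simp
  | cons p ps ih =>
    simp only [List.foldl_cons]
    rw [ih (pvAstep st p), ih (pvAstep ([], st.2) p), pvAstep_split st p]
    simp [List.append_assoc]

theorem pvDict_foldl_items_ne_nil (l : List (String × String)) (d : PySem.Dict String String) :
    (l.foldl (fun d p => d.insert p.1 p.2) d).items = [] ↔ (d.items = [] ∧ l = []) := by
  induction l generalizing d with
  | nil => simp
  | cons p l ih =>
    simp only [List.foldl_cons]
    rw [ih]
    constructor
    · rintro ⟨h, rfl⟩
      exfalso
      rcases hc : d.contains p.1 with _ | _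
      · rw [PySem.Dict.items_insert_of_not_contains _ _ hc] at h
        simp at h
      · rw [PySem.Dict.items_insert_of_contains _ _ hc] at h
        simp only [List.map_eq_nil_iff] at h
        have hd : d = PySem.Dict.empty := PySem.Dict.ext (by rw [h]; rfl)
        rw [hd] at hc
        simp [PySem.Dict.contains_empty] at hc
    · rintro ⟨_, h⟩; simp at h

-- final shape of A's fold from state ([], cur)
def pvAres (cur : PySem.Dict String String) (ps : List (String × String)) :
    List (List (String × String)) :=
  let st := ps.foldl pvAstep ([], cur)
  (if st.2.items.isEmpty then st.1 else st.1 ++ [st.2]).map (·.items)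

theorem pvMain (ps : List (String × String)) (cur : PySem.Dict String String) :
    pvAres cur ps
      = (if ((ps.foldr (fun p st => pvBstep st p) ([], [])).2.foldl
              (fun d p => d.insert p.1 p.2) cur).items.isEmpty then []
          else [((ps.foldr (fun p st => pvBstep st p) ([], [])).2.foldl
              (fun d p => d.insert p.1 p.2) cur).items])
        ++ (ps.foldr (fun p st => pvBstep st p) ([], [])).1.map pvDictOf := by
  induction ps generalizing cur with
  | nil =>
    simp only [pvAres, List.foldr_nil, List.foldl_nil]
    by_cases hc : cur.items.isEmpty <;> simp [hc]
  | cons p ps ih =>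
    rcases hBg : ps.foldr (fun p st => pvBstep st p) ([], []) with ⟨gs, c⟩
    by_cases h : p.1 = "command"
    · have hstep : pvAstep ([], cur) p
          = ((if cur.items.isEmpty then [] else [cur]),
             (PySem.Dict.empty : PySem.Dict String String).insert "command" p.2) := by
        simp [pvAstep, h]
      have hL : pvAres cur (p :: ps)
          = (if cur.items.isEmpty then [] else [cur.items])
              ++ pvAres ((PySem.Dict.empty : PySem.Dict String String).insert "command" p.2) ps := by
        simp only [pvAres, List.foldl_cons, hstep]
        rw [pvAfold_prefix ps (((if cur.items.isEmpty then [] else [cur]),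
              (PySem.Dict.empty : PySem.Dict String String).insert "command" p.2))]
        by_cases hc : cur.items.isEmpty <;>
          by_cases hf : ((ps.foldl pvAstep ([],
              (PySem.Dict.empty : PySem.Dict String String).insert "command" p.2)).2).items.isEmpty <;>
            simp [hc, hf]
      rw [hL, ih, hBg]
      have hne : ¬ ((c.foldl (fun d p => d.insert p.1 p.2)
          ((PySem.Dict.empty : PySem.Dict String String).insert "command" p.2)).items.isEmpty) := by
        rw [List.isEmpty_iff, pvDict_foldl_items_ne_nil]
        intro ⟨h1, _⟩
        rw [PySem.Dict.items_insert_of_not_contains] at h1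
        · simp at h1
        · simp
      have hdic : pvDictOf (p :: c)
          = (c.foldl (fun d p => d.insert p.1 p.2)
              ((PySem.Dict.empty : PySem.Dict String String).insert "command" p.2)).items := by
        simp only [pvDictOf, List.foldl_cons, h]
      simp only [List.foldr_cons]
      rw [hBg]
      simp only [pvBstep, h, if_true, List.foldl_nil, List.map_cons]
      simp [hne, hdic]
    · have hstep : pvAstep ([], cur) p = ([], cur.insert p.1 p.2) := by
        simp [pvAstep, h]
      have hL : pvAres cur (p :: ps) = pvAres (cur.insert p.1 p.2) ps := by
        simp only [pvAres, List.foldl_cons, hstep]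
      rw [hL, ih, hBg]
      simp only [List.foldr_cons]
      rw [hBg]
      simp only [pvBstep, h, if_false, List.foldl_cons]


-- ===== VERDICT (by name: the statement is the Claim_ definition above) =====
theorem parse_fifo_message_spec : Claim_equal_parse_fifo_message := by
  intro raw _
  unfold Spec_parse_fifo_message parse_fifo_message parse_fifo_message_alt
  rw [pvA_line_eq_pairs, pvB_pairs_eq_flatMap]
  simp only [List.nil_append, List.foldl_reverse]
  have hm := pvMain ((((PySem.Str.split? raw "\n").getD [])).flatMap pvKvs) PySem.Dict.empty
  simp only [pvAres] at hm
  rw [hm]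
  simp only [pvBstep]
  rcases hBg : (((PySem.Str.split? raw "\n").getD []).flatMap pvKvs).foldr
      (fun p st => if p.1 = "command" then ((p :: st.2) :: st.1, []) else (st.1, p :: st.2))
      ([], []) with ⟨gs, c⟩
  rw [hBg]
  by_cases hc : c = []
  · subst hc
    simp [PySem.Dict.empty]
  · have hne : ¬ ((c.foldl (fun d p => d.insert p.1 p.2)
        (PySem.Dict.empty : PySem.Dict String String)).items.isEmpty) := by
      rw [List.isEmpty_iff, pvDict_foldl_items_ne_nil]
      rintro ⟨_, rfl⟩
      exact hc rfl
    simp [hc, hne, pvDictOf]
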